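-- pv_equiv track=rewrite | github.com/ClaimsBoost/distillery | evaluation/scripts/evaluate.py | _calculate_partial_matches
-- ===== SOURCE A (Python) =====
-- from typing import Dict, Any, List, Optional, Set
--
-- def _calculate_partial_matches(extracted: Set[str], truth: Set[str],
--                                correct: Set[str]) -> int:
--     """Calculate partial matches for addresses"""
--     partial_matches = 0
--
--     for ext_addr in extracted:
--         if ext_addr in correct:
--             continue
--
--         # Extract city and state from normalized address
--         parts = ext_addr.split()
--         if len(parts) >= 2:
--             for truth_addr in truth:
--                 if ext_addr not in correct:
--                     # Check for significant overlap
--                     ext_words = set(ext_addr.split())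
--                     truth_words = set(truth_addr.split())
--                     common_words = ext_words & truth_words
--
--                     if len(common_words) >= 3:  # At least 3 common words
--                         partial_matches += 1
--                         break
--
--     return partial_matches
-- ===== SOURCE B (Python) =====
-- def _calculate_partial_matches(extracted, truth, correct):
--     """Inverted word -> truth-address index plus a per-extracted tally,
--     replacing the pairwise set-intersection scan."""
--     index = {}
--     for truth_addr in truth:
--         for word in set(truth_addr.split()):
--             index.setdefault(word, set()).add(truth_addr)
--
--     partial_matches = 0
--     for ext_addr in extracted:
--         if ext_addr in correct:
--             continue
--         if len(ext_addr.split()) < 2: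
--             continue
--         tally = {}
--         for word in set(ext_addr.split()):
--             for truth_addr in index.get(word, ()):
--                 tally[truth_addr] = tally.get(truth_addr, 0) + 1
--         if any(c >= 3 for c in tally.values()):
--             partial_matches += 1
--     return partial_matches
-- ===== Notes on version B (the rewrite author's own statement) =====
-- stated objective: alternative
-- what changed: Replaces A's pairwise extracted-by-truth set-intersection scan with an inverted word-to-truth-address index built once, then a per-extracted-address tally of index hits checked against the 3-common-word threshold.
import Mathlib
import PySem

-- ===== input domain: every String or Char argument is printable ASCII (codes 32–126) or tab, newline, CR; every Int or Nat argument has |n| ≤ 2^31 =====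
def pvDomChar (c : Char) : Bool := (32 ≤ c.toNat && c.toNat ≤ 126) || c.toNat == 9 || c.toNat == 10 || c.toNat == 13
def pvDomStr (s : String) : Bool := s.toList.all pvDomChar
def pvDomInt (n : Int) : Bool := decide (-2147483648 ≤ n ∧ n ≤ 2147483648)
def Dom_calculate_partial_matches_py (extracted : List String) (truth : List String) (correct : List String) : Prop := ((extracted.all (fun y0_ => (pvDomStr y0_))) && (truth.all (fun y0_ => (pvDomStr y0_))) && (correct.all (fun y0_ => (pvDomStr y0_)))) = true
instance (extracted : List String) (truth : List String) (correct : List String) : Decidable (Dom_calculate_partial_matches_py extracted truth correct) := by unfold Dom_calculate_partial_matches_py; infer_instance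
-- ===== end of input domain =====

-- B replaces A's pairwise extracted×truth set-intersection scan by an inverted
-- word→truth-address index queried once per extracted address (alternative decomposition).

-- ===== PORT A =====
-- inner 'for truth_addr in truth: … break' loop of A
def pvInnerA (ext_addr : String) (correct : List String) : List String → Int → Int
  | [], partial_matches => partial_matches
  | truth_addr :: rest, partial_matches =>
    if !(correct.contains ext_addr) then
      let ext_words := PySem.Set.ofList (PySem.Str.split₀ ext_addr)
      let truth_words := PySem.Set.ofList (PySem.Str.split₀ truth_addr)
      let common_words := PySem.Set.inter ext_words truth_words
      if 3 ≤ PySem.Set.len common_words then partial_matches + 1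
      else pvInnerA ext_addr correct rest partial_matches
    else pvInnerA ext_addr correct rest partial_matches

def calculate_partial_matches_py (extracted : List String) (truth : List String) (correct : List String) : Int :=
  extracted.foldl (fun partial_matches ext_addr =>
    if correct.contains ext_addr then partial_matches
    else
      let parts := PySem.Str.split₀ ext_addr
      if 2 ≤ parts.length then pvInnerA ext_addr correct truth partial_matches
      else partial_matches) 0

-- ===== PORT B =====
-- inverted index: word → set of truth addresses containing it
def pvIndexB (truth : List String) : PySem.Dict String (PySem.Set String) :=
  truth.foldl (fun index truth_addr =>
    (PySem.Set.ofList (PySem.Str.split₀ truth_addr)).foldl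
      (fun index word => index.modify word PySem.Set.empty (fun s => PySem.Set.add s truth_addr))
      index)
    PySem.Dict.empty

-- tally: truth address → number of the extracted address's distinct words hitting it
def pvTallyB (index : PySem.Dict String (PySem.Set String)) (words : PySem.Set String) : PySem.Dict String Int :=
  words.foldl (fun tally word =>
    (index.getD word PySem.Set.empty).foldl
      (fun tally truth_addr => tally.insert truth_addr (tally.getD truth_addr 0 + 1)) tally)
    PySem.Dict.empty

def calculate_partial_matches_py_alt (extracted : List String) (truth : List String) (correct : List String) : Int :=
  let index := pvIndexB truth
  extracted.foldl (fun partial_matches ext_addr =>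
    if correct.contains ext_addr then partial_matches
    else if (PySem.Str.split₀ ext_addr).length < 2 then partial_matches
    else
      let tally := pvTallyB index (PySem.Set.ofList (PySem.Str.split₀ ext_addr))
      if tally.values.any (fun c => decide (3 ≤ c)) then partial_matches + 1
      else partial_matches) 0

-- ===== PRECONDITION & SPEC =====
def Spec_calculate_partial_matches_py (extracted : List String) (truth : List String) (correct : List String) (out : Int) : Prop := out = calculate_partial_matches_py_alt extracted truth correct
instance (extracted : List String) (truth : List String) (correct : List String) (out : Int) : Decidable (Spec_calculate_partial_matches_py extracted truth correct out) := by unfold Spec_calculate_partial_matches_py; infer_instance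

-- ===== CLAIM (what is proved, stated in full; the proofs are below) =====
def Claim_equal_calculate_partial_matches_py : Prop := ∀ (extracted : List String) (truth : List String) (correct : List String), Dom_calculate_partial_matches_py extracted truth correct → Spec_calculate_partial_matches_py extracted truth correct (calculate_partial_matches_py extracted truth correct)

-- ===== LEMMAS AND PROOFS =====

-- distinct words of an address
def pvWords (s : String) : PySem.Set String := PySem.Set.ofList (PySem.Str.split₀ s)

-- 'ext partially matches t' : at least 3 common distinct words
def pvHit (ext t : String) : Bool :=
  decide (3 ≤ PySem.Set.len (PySem.Set.inter (pvWords ext) (pvWords t)))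

theorem pvInnerA_eq (ext : String) (correct : List String)
    (hc : correct.contains ext = false) :
    ∀ (ts : List String) (acc : Int),
      pvInnerA ext correct ts acc = if ts.any (pvHit ext) then acc + 1 else acc := by
  intro ts
  induction ts with
  | nil => intro acc; simp [pvInnerA]
  | cons t rest ih =>
    intro acc
    simp only [pvInnerA, hc, Bool.not_false, if_true, List.any_cons]
    by_cases h : pvHit ext t = true
    · have h3 : 3 ≤ PySem.Set.len (PySem.Set.inter (pvWords ext) (pvWords t)) := by
        simpa [pvHit] using h
      simp [pvWords] at h3
      simp [h, h3]
    · have h3 : ¬ 3 ≤ PySem.Set.len (PySem.Set.inter (pvWords ext) (pvWords t)) := by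
        simpa [pvHit] using h
      simp [pvWords] at h3
      simp [h, h3, ih]

theorem pvFold_modify_not_mem (t : String) (l : List String) (w : String) (hw : w ∉ l)
    (d : PySem.Dict String (PySem.Set String)) :
    ((l.foldl (fun d word => d.modify word PySem.Set.empty (fun s => PySem.Set.add s t)) d)).getD w PySem.Set.empty
      = d.getD w PySem.Set.empty := by
  induction l generalizing d with
  | nil => rfl
  | cons x xs ih =>
    simp only [List.foldl_cons]
    rw [ih (by simp at hw; exact hw.2)]
    simp only [PySem.Dict.modify]
    rw [PySem.Dict.getD_insert]
    simp at hw
    simp [hw.1]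

theorem pvIdx_inner (t : String) (l : List String) (hl : l.Nodup)
    (d : PySem.Dict String (PySem.Set String)) (w : String) :
    ((l.foldl (fun d word => d.modify word PySem.Set.empty (fun s => PySem.Set.add s t)) d)).getD w PySem.Set.empty
      = if w ∈ l then PySem.Set.add (d.getD w PySem.Set.empty) t else d.getD w PySem.Set.empty := by
  induction l generalizing d with
  | nil => simp
  | cons x xs ih =>
    simp only [List.foldl_cons, List.mem_cons]
    rcases List.nodup_cons.mp hl with ⟨hx, hxs⟩
    by_cases hwx : w = x
    · subst hwx
      rw [pvFold_modify_not_mem t xs w hx]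
      simp [PySem.Dict.modify]
    · rw [ih hxs]
      simp only [PySem.Dict.modify]
      rw [PySem.Dict.getD_insert]
      simp [hwx]

theorem pvIdx_gen (w : String) (truth : List String) :
    ∀ d : PySem.Dict String (PySem.Set String),
    (truth.foldl (fun index truth_addr =>
        (PySem.Set.ofList (PySem.Str.split₀ truth_addr)).foldl
          (fun index word => index.modify word PySem.Set.empty (fun s => PySem.Set.add s truth_addr))
          index) d).getD w PySem.Set.empty
      = (truth.filter (fun t => (pvWords t).contains w)).foldl PySem.Set.add (d.getD w PySem.Set.empty) := by
  induction truth with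
  | nil => intro d; rfl
  | cons t rest ih =>
    intro d
    simp only [List.foldl_cons, List.filter_cons]
    rw [ih]
    by_cases h : w ∈ pvWords t
    · have hc : ((pvWords t).contains w) = true := by simpa using h
      have h' : w ∈ PySem.Set.ofList (PySem.Str.split₀ t) := h
      rw [pvIdx_inner t _ (PySem.Set.nodup_ofList _) d w, if_pos h', if_pos hc, List.foldl_cons]
    · have hc : ((pvWords t).contains w) = false := by simpa using h
      have h' : w ∉ PySem.Set.ofList (PySem.Str.split₀ t) := h
      rw [pvIdx_inner t _ (PySem.Set.nodup_ofList _) d w, if_neg h', if_neg (by simpa using h)]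

theorem pvIdx_spec (truth : List String) (w : String) :
    (pvIndexB truth).getD w PySem.Set.empty
      = PySem.Set.ofList (truth.filter (fun t => (pvWords t).contains w)) := by
  rw [pvIndexB, pvIdx_gen, PySem.Set.ofList_eq_foldl]
  rfl

theorem pvMem_idx (truth : List String) (w t : String) :
    t ∈ (pvIndexB truth).getD w PySem.Set.empty ↔ t ∈ truth ∧ w ∈ pvWords t := by
  rw [pvIdx_spec, PySem.Set.mem_ofList, List.mem_filter]
  simp

theorem pvNodup_idx (truth : List String) (w : String) :
    ((pvIndexB truth).getD w PySem.Set.empty).Nodup := by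
  rw [pvIdx_spec]; exact PySem.Set.nodup_ofList _

theorem pvTally_getD_gen (index : PySem.Dict String (PySem.Set String))
    (hidx : ∀ w, (index.getD w PySem.Set.empty).Nodup) (ws : List String) (t : String) :
    ∀ d : PySem.Dict String Int,
    (ws.foldl (fun tally word =>
        (index.getD word PySem.Set.empty).foldl
          (fun tally truth_addr => tally.insert truth_addr (tally.getD truth_addr 0 + 1)) tally) d).getD t 0
      = d.getD t 0 + (ws.countP (fun w => (index.getD w PySem.Set.empty).contains t) : Int) := by
  induction ws with
  | nil => intro d; simp
  | cons w rest ih =>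
    intro d
    simp only [List.foldl_cons, List.countP_cons]
    rw [ih]
    rw [PySem.Dict.getD_foldl_insert_add_one]
    have hn := hidx w
    by_cases hm : t ∈ index.getD w PySem.Set.empty
    · have h1 : (index.getD w PySem.Set.empty).count t = 1 :=
        List.count_eq_one_of_mem hn hm
      have hc : (index.getD w PySem.Set.empty).contains t = true := by simpa using hm
      rw [h1, if_pos hc]
      push_cast
      ring
    · have h1 : (index.getD w PySem.Set.empty).count t = 0 := by
        simpa [List.count_eq_zero] using hm
      have hc : (index.getD w PySem.Set.empty).contains t = false := by simpa using hm
      rw [h1, if_neg (by exact fun hh => hm (by simpa using hh))]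
      push_cast
      ring

theorem pvTally_getD (truth : List String) (ws : List String) (t : String) :
    (pvTallyB (pvIndexB truth) ws).getD t 0
      = (ws.countP (fun w => ((pvIndexB truth).getD w PySem.Set.empty).contains t) : Int) := by
  rw [pvTallyB, pvTally_getD_gen _ (pvNodup_idx truth) ws t PySem.Dict.empty, PySem.Dict.getD_empty]
  ring

theorem pvTally_mem_keys_gen (index : PySem.Dict String (PySem.Set String)) (ws : List String) (t : String) :
    ∀ d : PySem.Dict String Int,
    (t ∈ (ws.foldl (fun tally word =>
        (index.getD word PySem.Set.empty).foldl
          (fun tally truth_addr => tally.insert truth_addr (tally.getD truth_addr 0 + 1)) tally) d).keys)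
      ↔ t ∈ d.keys ∨ ∃ w ∈ ws, t ∈ index.getD w PySem.Set.empty := by
  induction ws with
  | nil => intro d; simp
  | cons w rest ih =>
    intro d
    simp only [List.foldl_cons]
    rw [ih]
    rw [PySem.Dict.keys_foldl_insert]
    rw [PySem.Set.mem_update]
    simp only [List.mem_cons]
    constructor
    · rintro (⟨h | h⟩ | ⟨w', hw', hm⟩)
      · exact Or.inl h
      · exact Or.inr ⟨w, Or.inl rfl, h⟩
      · exact Or.inr ⟨w', Or.inr hw', hm⟩
    · rintro (h | ⟨w', hw' | hw', hm⟩)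
      · exact Or.inl (Or.inl h)
      · exact Or.inl (Or.inr (hw' ▸ hm))
      · exact Or.inr ⟨w', hw', hm⟩

theorem pvTally_mem_keys (truth : List String) (ws : List String) (t : String) :
    t ∈ (pvTallyB (pvIndexB truth) ws).keys
      ↔ ∃ w ∈ ws, t ∈ (pvIndexB truth).getD w PySem.Set.empty := by
  rw [pvTallyB, pvTally_mem_keys_gen]
  simp [PySem.Dict.keys_empty]

theorem pvTally_nodup_keys_gen (index : PySem.Dict String (PySem.Set String)) (ws : List String) :
    ∀ d : PySem.Dict String Int, d.keys.Nodup →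
    (ws.foldl (fun tally word =>
        (index.getD word PySem.Set.empty).foldl
          (fun tally truth_addr => tally.insert truth_addr (tally.getD truth_addr 0 + 1)) tally) d).keys.Nodup := by
  induction ws with
  | nil => intro d h; exact h
  | cons w rest ih =>
    intro d h
    simp only [List.foldl_cons]
    exact ih _ (PySem.Dict.nodup_keys_foldl_insert _ _ _ h)

theorem pvTally_nodup_keys (truth : List String) (ws : List String) :
    (pvTallyB (pvIndexB truth) ws).keys.Nodup := by
  rw [pvTallyB]
  exact pvTally_nodup_keys_gen _ ws PySem.Dict.empty (by simp [PySem.Dict.keys_empty])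

theorem pvCount_eq (truth : List String) (ext t : String) (ht : t ∈ truth) :
    ((pvWords ext).countP (fun w => ((pvIndexB truth).getD w PySem.Set.empty).contains t) : Int)
      = PySem.Set.len (PySem.Set.inter (pvWords ext) (pvWords t)) := by
  have hcongr : (pvWords ext).countP (fun w => ((pvIndexB truth).getD w PySem.Set.empty).contains t)
      = (pvWords ext).countP (fun w => (pvWords t).contains w) := by
    apply List.countP_congr
    intro w _
    by_cases h : w ∈ pvWords t
    · have h1 : ((pvIndexB truth).getD w PySem.Set.empty).contains t = true := by
        simpa using (pvMem_idx truth w t).mpr ⟨ht, h⟩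
      have h2 : (pvWords t).contains w = true := by simpa using h
      rw [h1, h2]
    · have h1 : ((pvIndexB truth).getD w PySem.Set.empty).contains t = false := by
        rcases hcase : ((pvIndexB truth).getD w PySem.Set.empty).contains t with _ | _
        · rfl
        · exact absurd ((pvMem_idx truth w t).mp (by simpa using hcase)).2 h
      have h2 : (pvWords t).contains w = false := by simpa using h
      rw [h1, h2]
  rw [hcongr, PySem.Set.len, PySem.Set.inter, List.countP_eq_length_filter]

theorem pvAny_eq (truth : List String) (ext : String) :
    (pvTallyB (pvIndexB truth) (pvWords ext)).values.any (fun c => decide (3 ≤ c))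
      = truth.any (pvHit ext) := by
  rcases hb : truth.any (pvHit ext) with _ | _
  · -- no hit: show values.any = false
    rw [List.any_eq_false]
    intro c hcv
    rw [PySem.Dict.values_eq_map_keys _ (pvTally_nodup_keys truth (pvWords ext)) 0] at hcv
    rcases List.mem_map.mp hcv with ⟨t, htk, rfl⟩
    rcases (pvTally_mem_keys truth (pvWords ext) t).mp htk with ⟨w, _, hmem⟩
    have ht : t ∈ truth := ((pvMem_idx truth w t).mp hmem).1
    have hnohit : pvHit ext t = false := by
      rw [List.any_eq_false] at hb
      simpa using hb t ht
    have h3 : ¬ (3 ≤ PySem.Set.len (PySem.Set.inter (pvWords ext) (pvWords t))) := by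
      simpa [pvHit] using hnohit
    rw [pvTally_getD, pvCount_eq truth ext t ht]
    simpa using h3
  · rw [List.any_eq_true] at hb
    rcases hb with ⟨t, ht, hhit⟩
    have h3 : 3 ≤ PySem.Set.len (PySem.Set.inter (pvWords ext) (pvWords t)) := by
      simpa [pvHit] using hhit
    rw [List.any_eq_true]
    refine ⟨(pvTallyB (pvIndexB truth) (pvWords ext)).getD t 0, ?_, ?_⟩
    · rw [PySem.Dict.values_eq_map_keys _ (pvTally_nodup_keys truth (pvWords ext)) 0]
      apply List.mem_map.mpr
      refine ⟨t, ?_, rfl⟩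
      rw [pvTally_mem_keys]
      have hpos : 0 < (pvWords ext).countP
          (fun w => ((pvIndexB truth).getD w PySem.Set.empty).contains t) := by
        have := pvCount_eq truth ext t ht
        omega
      rcases List.countP_pos_iff.mp hpos with ⟨w, hw, hcw⟩
      exact ⟨w, hw, by simpa using hcw⟩
    · rw [pvTally_getD, pvCount_eq truth ext t ht]
      simpa using h3

-- the two per-element step functions agree
theorem pvStep_eq (truth correct : List String) (acc : Int) (ext : String) :
    (if correct.contains ext then acc
     else
       let parts := PySem.Str.split₀ ext
       if 2 ≤ parts.length then pvInnerA ext correct truth acc else acc)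
    = (if correct.contains ext then acc
       else if (PySem.Str.split₀ ext).length < 2 then acc
       else
         let tally := pvTallyB (pvIndexB truth) (PySem.Set.ofList (PySem.Str.split₀ ext))
         if tally.values.any (fun c => decide (3 ≤ c)) then acc + 1 else acc) := by
  by_cases hc : correct.contains ext
  · rw [if_pos hc, if_pos hc]
  · have hc' : correct.contains ext = false := by simpa using hc
    by_cases hl : 2 ≤ (PySem.Str.split₀ ext).length
    · rw [if_neg hc, if_neg hc, if_pos hl, if_neg (by omega)]
      rw [pvInnerA_eq ext correct hc' truth acc]
      show _ = if (pvTallyB (pvIndexB truth) (pvWords ext)).values.any (fun c => decide (3 ≤ c)) = true then acc + 1 else acc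
      rw [pvAny_eq]
    · rw [if_neg hc, if_neg hc, if_neg hl, if_pos (by omega)]

-- ===== VERDICT (by name: the statement is the Claim_ definition above) =====
theorem calculate_partial_matches_py_spec : Claim_equal_calculate_partial_matches_py := by
  intro extracted truth correct _
  unfold Spec_calculate_partial_matches_py
  unfold calculate_partial_matches_py calculate_partial_matches_py_alt
  congr 1
  funext acc ext
  exact pvStep_eq truth correct acc ext
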